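-- pv_equiv track=rewrite | github.com/twaite11/collateral_bio_core | modules/mining/deep_miner_utils.py | has_crispr_array
-- ===== SOURCE A (Python) =====
-- def has_crispr_array(dna_sequence):
--     seq_str = str(dna_sequence)
--     length = len(seq_str)
--     if length < 400:
--         return False
--
--     min_repeats = 3
--     if length < 1500:
--         min_repeats = 2
--
--     for chunk_size in (24, 28, 32):
--         seen = {}
--         for i in range(0, length - chunk_size):
--             chunk = seq_str[i : i + chunk_size]
--             if chunk in seen:
--                 seen[chunk] += 1
--                 if seen[chunk] >= min_repeats:
--                     return True
--             else:
--                 seen[chunk] = 1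
--     return False
-- ===== SOURCE B (Python) =====
-- def has_crispr_array(dna_sequence):
--     seq_str = str(dna_sequence)
--     length = len(seq_str)
--     if length < 400:
--         return False
--
--     m = 2 if length < 1500 else 3
--
--     for chunk_size in (24, 28, 32):
--         ws = sorted(seq_str[i:i + chunk_size] for i in range(length - chunk_size))
--         # equal windows are adjacent after sorting: a window repeats >= m times
--         # exactly when some window equals the one m-1 positions later
--         for i in range(len(ws) - m + 1):
--             if ws[i] == ws[i + m - 1]:
--                 return True
--     return False
-- ===== Notes on version B (the rewrite author's own statement) =====
-- stated objective: alternative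
-- what changed: B drops A's seen-dictionary counting entirely: it sorts the windows of each chunk size and reports a repeat iff some window equals the window min_repeats-1 positions later in the sorted list (equal windows are adjacent after sorting).
import Mathlib
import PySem

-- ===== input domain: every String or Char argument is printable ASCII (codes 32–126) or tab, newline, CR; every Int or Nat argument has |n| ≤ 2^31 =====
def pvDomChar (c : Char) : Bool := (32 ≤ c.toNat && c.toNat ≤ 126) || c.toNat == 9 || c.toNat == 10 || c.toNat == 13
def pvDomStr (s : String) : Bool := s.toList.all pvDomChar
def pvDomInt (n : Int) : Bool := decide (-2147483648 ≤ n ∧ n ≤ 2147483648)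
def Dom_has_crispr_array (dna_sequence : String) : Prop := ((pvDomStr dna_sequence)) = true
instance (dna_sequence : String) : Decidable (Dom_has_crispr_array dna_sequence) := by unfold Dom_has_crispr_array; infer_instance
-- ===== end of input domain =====

-- B replaces A's dictionary counting entirely: it sorts the windows and looks for two
-- equal windows m-1 positions apart (repeats are adjacent after sorting).  Objective: alternative.

-- ===== PORT A =====
-- A's inner loop: walk the window list keeping the `seen` dict, early-return True
-- as soon as a count reaches min_repeats.
def hcaScan (chunks : List (List Char)) (minr : Int)
    (seen : PySem.Dict (List Char) Int) : Bool :=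
  match chunks with
  | [] => false
  | c :: rest =>
    match seen.get? c with
    | some v =>
      if v + 1 ≥ minr then true
      else hcaScan rest minr (seen.insert c (v + 1))
    | none => hcaScan rest minr (seen.insert c 1)

def has_crispr_array (dna_sequence : String) : Bool :=
  let seq := dna_sequence.toList
  let length := seq.length
  if length < 400 then false
  else
    let minr : Int := if length < 1500 then 2 else 3
    [24, 28, 32].any (fun cs =>
      hcaScan ((PySem.List.pyRange 0 ((length : Int) - cs) 1).map
          (fun i => PySem.List.slice seq (some i) (some (i + cs)))) minr
        PySem.Dict.empty)

-- ===== PORT B =====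
-- B's inner loops: ws = sorted(windows); then 'for i in range(len(ws) - m + 1):
-- if ws[i] == ws[i + m - 1]: return True'.  (ws[i] is always in range: len(ws) ≥ 368.)
def has_crispr_array_alt (dna_sequence : String) : Bool :=
  let seq := dna_sequence.toList
  let length := seq.length
  if length < 400 then false
  else
    let m : Int := if length < 1500 then 2 else 3
    [24, 28, 32].any (fun cs =>
      let ws := PySem.List.sorted ((PySem.List.pyRange 0 ((length : Int) - cs) 1).map
          (fun i => PySem.List.slice seq (some i) (some (i + cs)))) (fun x => x) false
      (PySem.List.pyRange 0 (PySem.List.len ws - m + 1) 1).any (fun i =>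
        PySem.List.pyGetD ws i [] == PySem.List.pyGetD ws (i + m - 1) []))

-- ===== PRECONDITION & SPEC =====
def Spec_has_crispr_array (dna_sequence : String) (out : Bool) : Prop := out = has_crispr_array_alt dna_sequence
instance (dna_sequence : String) (out : Bool) : Decidable (Spec_has_crispr_array dna_sequence out) := by unfold Spec_has_crispr_array; infer_instance

-- ===== CLAIM (what is proved, stated in full; the proofs are below) =====
def Claim_equal_has_crispr_array : Prop := ∀ (dna_sequence : String), Dom_has_crispr_array dna_sequence → Spec_has_crispr_array dna_sequence (has_crispr_array dna_sequence)

-- ===== LEMMAS AND PROOFS =====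

-- Invariant step: inserting c with count+1 keeps `seen` the exact count table of p ++ [c].
theorem inv_step (p : List (List Char)) (c : List Char) (seen : PySem.Dict (List Char) Int)
    (hget : ∀ x, seen.get? x = if x ∈ p then some ((p.count x : Nat) : Int) else none) :
    ∀ x, (seen.insert c (((p.count c : Nat) : Int) + 1)).get? x =
      if x ∈ p ++ [c] then some (((p ++ [c]).count x : Nat) : Int) else none := by
  intro x
  rw [PySem.Dict.get?_insert]
  by_cases hx : x = c
  · subst hx
    rw [if_pos rfl, if_pos (by simp)]
    have h1 : (p ++ [x]).count x = p.count x + 1 := by simp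
    rw [h1]; push_cast; ring_nf
  · rw [if_neg hx, hget x]
    have hcnt : (p ++ [c]).count x = p.count x := by
      simp [List.count_append, List.count_eq_zero, hx]
    by_cases hxp : x ∈ p
    · rw [if_pos hxp, if_pos (by simp [hxp]), hcnt]
    · rw [if_neg hxp, if_neg (by simp [hxp, hx])]

-- Bound step: all counts in p ++ [c] stay below minr.
theorem lt_step (p : List (List Char)) (c : List Char) (minr : Int)
    (hlt : ∀ x ∈ p, ((p.count x : Nat) : Int) < minr)
    (hstep : ((p.count c : Nat) : Int) + 1 < minr) :
    ∀ x ∈ p ++ [c], (((p ++ [c]).count x : Nat) : Int) < minr := by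
  intro x hx
  by_cases hxc : x = c
  · subst hxc
    have h1 : (p ++ [x]).count x = p.count x + 1 := by simp
    rw [h1]; push_cast at hstep ⊢; omega
  · have h1 : (p ++ [c]).count x = p.count x := by
      simp [List.count_append, List.count_eq_zero, hxc]
    rw [h1]
    exact hlt x (by simpa [hxc] using hx)

-- A's early-exit dict scan answers exactly "does some window occur ≥ minr times":
-- generalized over the already-processed prefix p that `seen` tabulates.
theorem hcaScan_eq_count (minr : Int) (hm : 2 ≤ minr) :
    ∀ (rest p : List (List Char)) (seen : PySem.Dict (List Char) Int),
      (∀ c, seen.get? c = if c ∈ p then some ((p.count c : Nat) : Int) else none) →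
      (∀ c ∈ p, ((p.count c : Nat) : Int) < minr) →
      hcaScan rest minr seen =
        (p ++ rest).any (fun c => decide (minr ≤ (((p ++ rest).count c : Nat) : Int))) := by
  intro rest
  induction rest with
  | nil =>
    intro p seen _ hlt
    simp only [hcaScan, List.append_nil]
    symm
    simp only [List.any_eq_false, decide_eq_true_eq]
    intro c hc
    exact not_le.mpr (hlt c hc)
  | cons c r ih =>
    intro p seen hget hlt
    by_cases hc : c ∈ p
    · have hgc : seen.get? c = some ((p.count c : Nat) : Int) := by rw [hget c, if_pos hc]
      simp only [hcaScan, hgc]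
      split_ifs with hge
      · symm
        simp only [List.any_eq_true, decide_eq_true_eq]
        refine ⟨c, by simp, ?_⟩
        have h1 : (p ++ c :: r).count c = p.count c + (r.count c + 1) := by
          simp [List.count_append]
        rw [h1]; push_cast; omega
      · have hsplit : p ++ c :: r = (p ++ [c]) ++ r := by simp
        rw [hsplit]
        exact ih (p ++ [c]) _ (inv_step p c seen hget)
          (lt_step p c minr hlt (by omega))
    · have hgc : seen.get? c = none := by rw [hget c, if_neg hc]
      simp only [hcaScan, hgc]
      have h0 : p.count c = 0 := List.count_eq_zero_of_not_mem hc
      have hone : (1 : Int) = ((p.count c : Nat) : Int) + 1 := by rw [h0]; simp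
      have hsplit : p ++ c :: r = (p ++ [c]) ++ r := by simp
      rw [hone, hsplit]
      exact ih (p ++ [c]) _ (inv_step p c seen hget)
        (lt_step p c minr hlt (by rw [h0]; push_cast; omega))

-- In a nondecreasing list whose head is v, the first count-v entries are all v.
theorem take_count_replicate {α : Type} [LinearOrder α] [BEq α] [LawfulBEq α] :
    ∀ (s : List α) (v : α), s.Pairwise (· ≤ ·) → s[0]? = some v →
      s.take (s.count v) = List.replicate (s.count v) v := by
  intro s
  induction s with
  | nil => intro v _ h0; simp at h0
  | cons a t ih =>
    intro v hp h0
    have hav : a = v := by simpa using h0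
    subst hav
    have hcnt : (a :: t).count a = t.count a + 1 := by simp
    rw [hcnt, List.take_succ_cons, List.replicate_succ]
    rcases List.pairwise_cons.mp hp with ⟨hhead, htail⟩
    by_cases h0t : t.count a = 0
    · simp [h0t]
    · have hmem : a ∈ t := List.count_pos_iff.mp (by omega)
      cases t with
      | nil => simp at hmem
      | cons b t' =>
        have hba : b = a := by
          rcases List.mem_cons.mp hmem with h | h
          · exact h.symm
          · exact le_antisymm ((List.pairwise_cons.mp htail).1 a h) (hhead b (by simp))
        have := ih a htail (by simp [hba])
        simp [this]

-- A value with count ≥ k+1 in a nondecreasing list yields two equal entries k apart.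
theorem rep_of_count {α : Type} [LinearOrder α] [BEq α] [LawfulBEq α] :
    ∀ (s : List α), s.Pairwise (· ≤ ·) → ∀ (v : α) (k : Nat), k + 1 ≤ s.count v →
      ∃ (i : Nat) (h : i + k < s.length),
        s[i]'(by omega) = v ∧ s[i + k]'h = v := by
  intro s
  induction s with
  | nil => intro _ v k hk; simp at hk
  | cons a t ih =>
    intro hp v k hk
    by_cases hav : a = v
    · subst hav
      have hrep := take_count_replicate (a :: t) a hp (by simp)
      have hcl : (a :: t).count a ≤ (a :: t).length := List.count_le_length
      have hkl : k < (a :: t).length := by omega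
      refine ⟨0, by omega, by simp, ?_⟩
      have h1 : (a :: t)[k]'(by omega) =
          ((a :: t).take ((a :: t).count a))[k]'(by
            simp only [List.length_take]; omega) := List.getElem_take.symm
      have h2 := List.getElem_of_eq hrep (by
        simp only [List.length_take]; omega : k < ((a :: t).take ((a :: t).count a)).length)
      simp only [List.getElem_replicate] at h2
      simp only [Nat.zero_add]
      rw [h1, h2]
    · have hct : t.count v = (a :: t).count v := by
        simp [hav]
      rcases ih (List.pairwise_cons.mp hp).2 v k (by omega) with ⟨i, h, h1, h2⟩
      refine ⟨i + 1, by simp; omega, by simpa using h1, ?_⟩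
      have hcast : (a :: t)[i + 1 + k]'(by simp; omega) =
          (a :: t)[i + k + 1]'(by simp; omega) := by congr 1; omega
      rw [hcast, List.getElem_cons_succ]
      exact h2

-- Two equal entries k apart in a nondecreasing list give that value count ≥ k+1.
theorem count_of_rep {α : Type} [LinearOrder α] [BEq α] [LawfulBEq α] (s : List α) (hp : s.Pairwise (· ≤ ·))
    (i k : Nat) (h : i + k < s.length) (heq : s[i]'(by omega) = s[i + k]'h) :
    k + 1 ≤ s.count (s[i]'(by omega)) := by
  set v := s[i]'(by omega) with hv
  have hseg : (s.drop i).take (k + 1) = List.replicate (k + 1) v := by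
    rw [List.eq_replicate_iff]
    constructor
    · simp only [List.length_take, List.length_drop]
      omega
    · intro b hb
      rcases List.mem_iff_getElem.mp hb with ⟨j, hj, hbj⟩
      have hjk : j < k + 1 := by
        have hj' := hj
        simp only [List.length_take, List.length_drop, lt_min_iff] at hj'
        exact hj'.1
      have h1 : ((s.drop i).take (k + 1))[j]'hj = (s.drop i)[j]'(by
          simp only [List.length_drop]; omega) := List.getElem_take
      have h2 : (s.drop i)[j]'(by simp only [List.length_drop]; omega) =
          s[i + j]'(by omega) := List.getElem_drop
      have hmono := List.pairwise_iff_getElem.mp hp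
      have hle1 : v ≤ s[i + j]'(by omega) := by
        rcases Nat.eq_zero_or_pos j with h0 | h0
        · subst h0; simp [hv]
        · exact hmono i (i + j) (by omega) (by omega) (by omega)
      have hle2 : s[i + j]'(by omega) ≤ v := by
        rcases Nat.lt_or_ge j k with hjk' | hjk'
        · have := hmono (i + j) (i + k) (by omega) h (by omega)
          rw [← heq] at this; exact this
        · have hjk2 : j = k := by omega
          subst hjk2
          exact le_of_eq heq.symm
      rw [← hbj, h1, h2]
      exact le_antisymm hle2 hle1
  have hsub : ((s.drop i).take (k + 1)).Sublist s :=
    (List.take_sublist _ _).trans (List.drop_sublist _ _)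
  have := hsub.count_le v
  rw [hseg, List.count_replicate_self] at this
  omega

-- B's index scan over any nondecreasing rearrangement ws of the window list answers
-- "does some window occur ≥ m times in chunks".
theorem scanB_core (chunks ws : List (List Char)) (hperm : ws.Perm chunks)
    (hpair : ws.Pairwise (· ≤ ·)) (m : Nat) (hm : 2 ≤ m) :
    ((PySem.List.pyRange 0 (PySem.List.len ws - (m : Int) + 1) 1).any
      (fun i => PySem.List.pyGetD ws i [] == PySem.List.pyGetD ws (i + (m : Int) - 1) [])) =
    chunks.any (fun c => decide ((m : Int) ≤ ((chunks.count c : Nat) : Int))) := by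
  rw [Bool.eq_iff_iff]
  simp only [List.any_eq_true, PySem.List.mem_pyRange_one, PySem.List.len_eq,
    decide_eq_true_eq, beq_iff_eq]
  constructor
  · rintro ⟨i, ⟨hi0, hiN⟩, heq⟩
    have hlen : i.toNat + (m - 1) < ws.length := by omega
    have hg1 : PySem.List.pyGetD ws i [] = ws[i.toNat]'(by omega) :=
      PySem.List.pyGetD_eq_getElem ws [] hi0 (by omega)
    have hg2 : PySem.List.pyGetD ws (i + (m : Int) - 1) [] =
        ws[(i + (m : Int) - 1).toNat]'(by omega) :=
      PySem.List.pyGetD_eq_getElem ws [] (by omega) (by omega)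
    rw [hg1, hg2] at heq
    have heq' : ws[i.toNat]'(by omega) = ws[i.toNat + (m - 1)]'hlen := by
      rw [heq]; congr 1; omega
    have hcnt := count_of_rep ws hpair i.toNat (m - 1) hlen heq'
    refine ⟨ws[i.toNat]'(by omega), ?_, ?_⟩
    · exact hperm.mem_iff.mp (ws.getElem_mem _)
    · rw [← hperm.count_eq]
      omega
  · rintro ⟨c, hc, hcnt⟩
    have hcw : (m - 1) + 1 ≤ ws.count c := by
      rw [hperm.count_eq]; omega
    rcases rep_of_count ws hpair c (m - 1) hcw with ⟨i, h, h1, h2⟩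
    refine ⟨(i : Int), ⟨by omega, by omega⟩, ?_⟩
    have hg1 : PySem.List.pyGetD ws (i : Int) [] = ws[i]'(by omega) := by
      rw [PySem.List.pyGetD_eq_getElem ws [] (by omega) (by omega)]
      simp
    have hg2 : PySem.List.pyGetD ws ((i : Int) + (m : Int) - 1) [] =
        ws[i + (m - 1)]'h := by
      rw [PySem.List.pyGetD_eq_getElem ws [] (by omega) (by omega)]
      congr 1; omega
    rw [hg1, hg2, h1, h2]

-- The port's `sorted` (core list-order instances) is pairwise-nondecreasing.
theorem sorted_pairwise_le (chunks : List (List Char)) :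
    (PySem.List.sorted chunks (fun x => x) false).Pairwise (· ≤ ·) := by
  have h := PySem.List.sorted_pairwise (κ := List Char) chunks (fun x => x)
  convert h using 2

-- Per chunk size: A's scan from the empty dict equals B's sorted check.
theorem per_chunk (chunks : List (List Char)) (m : Nat) (hm : 2 ≤ m) :
    hcaScan chunks (m : Int) PySem.Dict.empty =
    ((PySem.List.pyRange 0
        (PySem.List.len (PySem.List.sorted chunks (fun x => x) false) - (m : Int) + 1) 1).any
      (fun i => PySem.List.pyGetD (PySem.List.sorted chunks (fun x => x) false) i [] ==
        PySem.List.pyGetD (PySem.List.sorted chunks (fun x => x) false) (i + (m : Int) - 1) [])) := by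
  rw [scanB_core chunks (PySem.List.sorted chunks (fun x => x) false)
    (PySem.List.sorted_perm chunks (fun x => x) false)
    (sorted_pairwise_le chunks) m hm]
  have := hcaScan_eq_count (m : Int) (by exact_mod_cast hm) chunks [] PySem.Dict.empty
    (by intro c; simp [PySem.Dict.get?_empty]) (by intro c hc; simp at hc)
  simpa using this

-- Per chunk size, at the two literal thresholds the ports use.
theorem per_chunk_lit (chunks : List (List Char)) (mi : Int) (hmi : mi = 2 ∨ mi = 3) :
    hcaScan chunks mi PySem.Dict.empty =
    ((PySem.List.pyRange 0
        (PySem.List.len (PySem.List.sorted chunks (fun x => x) false) - mi + 1) 1).any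
      (fun i => PySem.List.pyGetD (PySem.List.sorted chunks (fun x => x) false) i [] ==
        PySem.List.pyGetD (PySem.List.sorted chunks (fun x => x) false) (i + mi - 1) [])) := by
  rcases hmi with h | h <;> subst h
  · have h := per_chunk chunks 2 (by norm_num)
    norm_num at h
    simpa using h
  · have h := per_chunk chunks 3 (by norm_num)
    norm_num at h
    simpa using h

-- ===== VERDICT (by name: the statement is the Claim_ definition above) =====
theorem has_crispr_array_spec : Claim_equal_has_crispr_array := by
  intro s _
  unfold Spec_has_crispr_array has_crispr_array has_crispr_array_alt
  simp only []
  split_ifs with h1 h2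
  · rfl
  · refine PySem.List.any_congr_mem ?_
    intro cs _
    exact per_chunk_lit _ 2 (Or.inl rfl)
  · refine PySem.List.any_congr_mem ?_
    intro cs _
    exact per_chunk_lit _ 3 (Or.inr rfl)
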